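-- pv_equiv track=rewrite | github.com/Suk1412/NexlifyAPP | weave/func.py | matches_B
-- ===== SOURCE A (Python) =====
-- import itertools
--
-- def get_1_blocks(lst):
--     """获取列表中连续的1块长度列表"""
--     return [len(list(g)) for k, g in itertools.groupby(lst) if k == 1]
--
-- def matches_B(lst, condition_lst):
--     """判断列表是否包含 condition_lst 中所需的所有连续1块"""
--     block_list = get_1_blocks(lst)
--     temp = block_list.copy()
--     for b in condition_lst:
--         if b in temp:
--             temp.remove(b)
--         else:
--             return False
--     return True
-- ===== SOURCE B (Python) =====
-- def matches_B(lst, condition_lst):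
--     # sort the 1-run lengths and the conditions, then one two-pointer merge pass
--     blocks = []
--     run = 0
--     for x in lst:
--         if x == 1:
--             run += 1
--         else:
--             if run:
--                 blocks.append(run)
--             run = 0
--     if run:
--         blocks.append(run)
--     blocks.sort()
--     need = sorted(condition_lst)
--     i = 0
--     for v in need:
--         while i < len(blocks) and blocks[i] < v:
--             i += 1
--         if i == len(blocks) or blocks[i] != v:
--             return False
--         i += 1
--     return True
-- ===== Notes on version B (the rewrite author's own statement) =====
-- stated objective: alternative
-- what changed: Replaces the scan-and-remove sub-multiset loop with sorting both the 1-run lengths and the conditions and checking inclusion in a single two-pointer merge pass.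
import Mathlib
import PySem

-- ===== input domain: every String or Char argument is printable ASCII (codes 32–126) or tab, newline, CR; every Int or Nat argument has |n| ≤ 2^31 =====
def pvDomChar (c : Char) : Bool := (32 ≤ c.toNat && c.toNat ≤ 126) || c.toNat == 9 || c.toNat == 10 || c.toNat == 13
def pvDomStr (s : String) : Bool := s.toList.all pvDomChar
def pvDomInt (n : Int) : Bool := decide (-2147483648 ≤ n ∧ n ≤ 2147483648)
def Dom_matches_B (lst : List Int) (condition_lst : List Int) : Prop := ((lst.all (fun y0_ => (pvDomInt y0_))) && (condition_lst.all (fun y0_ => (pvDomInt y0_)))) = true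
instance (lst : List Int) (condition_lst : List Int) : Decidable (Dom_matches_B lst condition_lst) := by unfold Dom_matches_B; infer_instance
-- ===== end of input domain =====

-- B replaces A's scan-and-remove sub-multiset loop by sorting the 1-run lengths and the
-- conditions and checking inclusion in a single two-pointer merge pass (objective: alternative).

-- ===== PORT A =====
-- hand port of itertools.groupby over a list: the (key, group-length) runs, left to right (exact for lists of ints)
def pvGroupbyGo : List Int → Int → Nat → List (Int × Nat) → List (Int × Nat)
  | [], k, n, acc => acc ++ [(k, n)]
  | x :: xs, k, n, acc => if x = k then pvGroupbyGo xs k (n + 1) acc else pvGroupbyGo xs x 1 (acc ++ [(k, n)])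

def pvGroupby : List Int → List (Int × Nat)
  | [] => []
  | x :: xs => pvGroupbyGo xs x 1 []

-- [len(list(g)) for k, g in itertools.groupby(lst) if k == 1]
def get_1_blocks (lst : List Int) : List Int :=
  (pvGroupby lst).filterMap (fun p => if p.1 = 1 then some (p.2 : Int) else none)

-- the for-loop over condition_lst: `if b in temp: temp.remove(b) else: return False`
def pvLoopA : List Int → List Int → Bool
  | _, [] => true
  | temp, b :: rest =>
      if temp.contains b then pvLoopA ((PySem.List.remove? temp b).getD temp) rest
      else false

def matches_B (lst : List Int) (condition_lst : List Int) : Bool :=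
  pvLoopA (get_1_blocks lst) condition_lst

-- ===== PORT B =====
-- the run-counting for-loop over lst (blocks/run accumulator)
def pvBlockStep (st : List Int × Int) (x : Int) : List Int × Int :=
  if x = 1 then (st.1, st.2 + 1)
  else if st.2 ≠ 0 then (st.1 ++ [st.2], 0) else (st.1, 0)

def pvBlocks (lst : List Int) : List Int :=
  let st := lst.foldl pvBlockStep ([], 0)
  if st.2 ≠ 0 then st.1 ++ [st.2] else st.1

-- the `for v in need:` loop with its inner `while` advancing the block pointer:
-- equivalently consumes the sorted block list from the front
def pvMerge : List Int → List Int → Bool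
  | _, [] => true
  | [], _ :: _ => false
  | b :: bs, v :: rest =>
      if b < v then pvMerge bs (v :: rest)
      else if b = v then pvMerge bs rest
      else false

def matches_B_alt (lst : List Int) (condition_lst : List Int) : Bool :=
  let blocks := PySem.List.sorted (pvBlocks lst) (fun x => x) false
  let need := PySem.List.sorted condition_lst (fun x => x) false
  pvMerge blocks need

-- ===== PRECONDITION & SPEC =====
def Spec_matches_B (lst : List Int) (condition_lst : List Int) (out : Bool) : Prop := out = matches_B_alt lst condition_lst
instance (lst : List Int) (condition_lst : List Int) (out : Bool) : Decidable (Spec_matches_B lst condition_lst out) := by unfold Spec_matches_B; infer_instance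

-- ===== CLAIM =====
def Claim_equal_matches_B : Prop := ∀ (lst : List Int) (condition_lst : List Int), Dom_matches_B lst condition_lst → Spec_matches_B lst condition_lst (matches_B lst condition_lst)

-- ===== LEMMAS AND PROOFS =====

def pvFilt (l : List (Int × Nat)) : List Int :=
  l.filterMap (fun p => if p.1 = 1 then some (p.2 : Int) else none)

def pvFinish (st : List Int × Int) : List Int := if st.2 ≠ 0 then st.1 ++ [st.2] else st.1

lemma pvBridge : ∀ (xs : List Int) (k : Int) (n : Nat) (acc : List (Int × Nat)) (bl : List Int),
    0 < n → pvFilt acc = bl →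
    pvFinish (xs.foldl pvBlockStep (bl, if k = 1 then (n : Int) else 0)) =
      pvFilt (pvGroupbyGo xs k n acc) := by
  intro xs
  induction xs with
  | nil =>
    intro k n acc bl hn hacc
    have hn0 : ¬ n = 0 := by omega
    by_cases hk : k = 1
    · simp [pvGroupbyGo, pvFilt, pvFinish, hk, hn0, List.filterMap_append, ← hacc]
    · simp [pvGroupbyGo, pvFilt, pvFinish, hk, List.filterMap_append, ← hacc]
  | cons x xs ih =>
    intro k n acc bl hn hacc
    simp only [List.foldl_cons]
    by_cases hxk : x = k
    · simp only [pvGroupbyGo, if_pos hxk]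
      by_cases hk : k = 1
      · have hx1 : x = 1 := hxk.trans hk
        have hstep : pvBlockStep (bl, if k = 1 then (n : Int) else 0) x
            = (bl, if k = 1 then ((n + 1 : Nat) : Int) else 0) := by
          simp [pvBlockStep, hx1, hk]
        rw [hstep]
        exact ih k (n + 1) acc bl (by omega) hacc
      · have hx1 : x ≠ 1 := by rw [hxk]; exact hk
        have hstep : pvBlockStep (bl, if k = 1 then (n : Int) else 0) x
            = (bl, if k = 1 then ((n + 1 : Nat) : Int) else 0) := by
          simp [pvBlockStep, hx1, hk]
        rw [hstep]
        exact ih k (n + 1) acc bl (by omega) hacc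
    · simp only [pvGroupbyGo, if_neg hxk]
      by_cases hk : k = 1
      · have hx1 : x ≠ 1 := by rw [hk] at hxk; exact hxk
        have hn0 : ¬ n = 0 := by omega
        have hacc' : pvFilt (acc ++ [(k, n)]) = bl ++ [(n : Int)] := by
          simp [pvFilt, List.filterMap_append, hk, ← hacc]
        have hstep : pvBlockStep (bl, if k = 1 then (n : Int) else 0) x
            = (bl ++ [(n : Int)], if x = 1 then ((1 : Nat) : Int) else 0) := by
          simp [pvBlockStep, hx1, hk, hn0]
        rw [hstep]
        exact ih x 1 (acc ++ [(k, n)]) (bl ++ [(n : Int)]) (by omega) hacc'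
      · have hacc' : pvFilt (acc ++ [(k, n)]) = bl := by
          simp [pvFilt, List.filterMap_append, hk, ← hacc]
        have hstep : pvBlockStep (bl, if k = 1 then (n : Int) else 0) x
            = (bl, if x = 1 then ((1 : Nat) : Int) else 0) := by
          by_cases hx1 : x = 1 <;> simp [pvBlockStep, hx1, hk]
        rw [hstep]
        exact ih x 1 (acc ++ [(k, n)]) bl (by omega) hacc'

lemma pvBlocks_eq (lst : List Int) : pvBlocks lst = get_1_blocks lst := by
  cases lst with
  | nil => rfl
  | cons x xs =>
    have h : pvBlockStep ([], 0) x = ([], if x = 1 then ((1 : Nat) : Int) else 0) := by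
      by_cases hx1 : x = 1 <;> simp [pvBlockStep, hx1]
    show (if ((x :: xs).foldl pvBlockStep ([], 0)).2 ≠ 0 then _ ++ [_] else _) = _
    rw [show (if ((x :: xs).foldl pvBlockStep ([], 0)).2 ≠ 0
          then ((x :: xs).foldl pvBlockStep ([], 0)).1 ++ [((x :: xs).foldl pvBlockStep ([], 0)).2]
          else ((x :: xs).foldl pvBlockStep ([], 0)).1)
        = pvFinish ((x :: xs).foldl pvBlockStep ([], 0)) from rfl]
    rw [List.foldl_cons, h]
    rw [pvBridge xs x 1 [] [] (by omega) rfl]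
    rfl

lemma pvLoopA_iff : ∀ (cond temp : List Int),
    pvLoopA temp cond = true ↔ ∀ v : Int, cond.count v ≤ temp.count v := by
  intro cond
  induction cond with
  | nil => intro temp; simp [pvLoopA]
  | cons b rest ih =>
    intro temp
    by_cases hb : b ∈ temp
    · have hc : temp.contains b = true := by simpa using hb
      have hr : PySem.List.remove? temp b = some (temp.erase b) :=
        PySem.List.remove?_eq_some_erase temp b hb
      simp only [pvLoopA, hc, if_true, hr, Option.getD_some, ih]
      have hpos : 1 ≤ temp.count b := List.count_pos_iff.2 hb
      constructor
      · intro h v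
        have hv := h v
        rw [List.count_erase] at hv
        simp only [List.count_cons]
        by_cases hvb : v = b
        · subst hvb; simp only [beq_self_eq_true, if_true] at hv ⊢; omega
        · have hbv : (b == v) = false := by simpa using (Ne.symm hvb)
          simp only [hbv, Bool.false_eq_true, if_false] at hv ⊢; omega
      · intro h v
        have hv := h v
        rw [List.count_erase]
        simp only [List.count_cons] at hv
        by_cases hvb : v = b
        · subst hvb; simp only [beq_self_eq_true, if_true] at hv ⊢; omega
        · have hbv : (b == v) = false := by simpa using (Ne.symm hvb)
          simp only [hbv, Bool.false_eq_true, if_false] at hv ⊢; omega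
    · have hc : temp.contains b = false := by simpa using hb
      simp only [pvLoopA, hc, if_false, Bool.false_eq_true, false_iff, not_forall]
      refine ⟨b, ?_⟩
      have h0 : temp.count b = 0 := List.count_eq_zero_of_not_mem hb
      simp [h0]

lemma pvMerge_iff : ∀ (B N : List Int), B.Pairwise (· ≤ ·) → N.Pairwise (· ≤ ·) →
    (pvMerge B N = true ↔ ∀ v : Int, N.count v ≤ B.count v) := by
  intro B
  induction B with
  | nil =>
    intro N _ _
    cases N with
    | nil => simp [pvMerge]
    | cons v rest =>
      simp only [pvMerge, Bool.false_eq_true, false_iff, not_forall]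
      refine ⟨v, ?_⟩
      simp [List.count_cons_self]
  | cons b bs ih =>
    intro N hB hN
    have hBtail := hB.tail
    have hBhead : ∀ y ∈ bs, b ≤ y := fun y hy => (List.pairwise_cons.1 hB).1 y hy
    cases N with
    | nil => simp [pvMerge]
    | cons v rest =>
      have hNtail := hN.tail
      have hNhead : ∀ y ∈ rest, v ≤ y := fun y hy => (List.pairwise_cons.1 hN).1 y hy
      by_cases hlt : b < v
      · rw [show pvMerge (b :: bs) (v :: rest) = pvMerge bs (v :: rest) by
            simp [pvMerge, hlt]]
        rw [ih (v :: rest) hBtail hN]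
        have hnb : (v :: rest).count b = 0 := by
          apply List.count_eq_zero_of_not_mem
          intro hmem
          rcases List.mem_cons.1 hmem with h1 | h2
          · omega
          · exact absurd (hNhead b h2) (by omega)
        constructor
        · intro h w
          exact (h w).trans List.count_le_count_cons
        · intro h w
          by_cases hwb : w = b
          · subst hwb; simp [hnb]
          · have hbw : (b == w) = false := by simpa using (Ne.symm hwb)
            have hw := h w
            simpa [List.count_cons, hbw] using hw
      · by_cases heq : b = v
        · rw [show pvMerge (b :: bs) (v :: rest) = pvMerge bs rest by
              simp [pvMerge, heq]]
          rw [ih rest hBtail hNtail]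
          subst heq
          constructor
          · intro h w
            have hw := h w
            by_cases hbw : b = w
            · subst hbw; simp only [List.count_cons_self]; omega
            · have hbw' : (b == w) = false := by simpa using hbw
              simpa [List.count_cons, hbw'] using hw
          · intro h w
            have hw := h w
            by_cases hbw : b = w
            · subst hbw; simp only [List.count_cons_self] at hw; omega
            · have hbw' : (b == w) = false := by simpa using hbw
              simpa [List.count_cons, hbw'] using hw
        · rw [show pvMerge (b :: bs) (v :: rest) = false by
              simp [pvMerge, hlt, heq]]
          simp only [Bool.false_eq_true, false_iff, not_forall]
          refine ⟨v, ?_⟩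
          have hvb : v < b := by omega
          have hnv : (b :: bs).count v = 0 := by
            apply List.count_eq_zero_of_not_mem
            intro hmem
            rcases List.mem_cons.1 hmem with h1 | h2
            · omega
            · exact absurd (hBhead v h2) (by omega)
          simp [hnv, List.count_cons_self]

lemma pvCount_sorted (xs : List Int) (v : Int) :
    (PySem.List.sorted xs (fun x => x) false).count v = xs.count v :=
  (PySem.List.sorted_perm xs (fun x => x) false).count_eq v

-- ===== VERDICT =====
theorem matches_B_spec : Claim_equal_matches_B := by
  intro lst cond _
  unfold Spec_matches_B matches_B matches_B_alt
  rw [Bool.eq_iff_iff, pvLoopA_iff]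
  rw [pvMerge_iff _ _ (PySem.List.sorted_pairwise _ _) (PySem.List.sorted_pairwise _ _)]
  constructor
  · intro h v; rw [pvCount_sorted, pvCount_sorted, pvBlocks_eq]; exact h v
  · intro h v
    have := h v
    rwa [pvCount_sorted, pvCount_sorted, pvBlocks_eq] at this
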